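-- pv_equiv track=rewrite | github.com/chenxiaoying21/apollo | modules/planning/planning_base/tools/log_util.py | search_last
-- ===== SOURCE A (Python) =====
-- def get_string_between(string, st, ed=''):
--     """get string between keywords"""
--     if string.find(st) < 0:
--         return ''
--     sub_string = string[string.find(st) + len(st):]
--     if len(ed) == 0 or sub_string.find(ed) < 0:
--         return sub_string.strip()
--     return sub_string[:sub_string.find(ed)]
--
-- def search_last(lines, line_search_num):
--     end_line_num = -1
--     seq_id = '-1'
--     for i in range(line_search_num, 0, -1):
--         if 'Planning end frame sequence id' in lines[i]:
--             seq_id = get_string_between(lines[i], 'sequence id = [', ']')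
--             end_line_num = i
--             break
--     if end_line_num < 0:
--         return -1, -1, seq_id
--
--     for i in range(end_line_num, 0, -1):
--         if 'Planning start frame sequence id = [' + seq_id in lines[i]:
--             return i, end_line_num, seq_id
--     return -1, end_line_num, seq_id
-- ===== SOURCE B (Python) =====
-- def get_string_between(string, st, ed=''):
--     """get string between keywords"""
--     if string.find(st) < 0:
--         return ''
--     sub_string = string[string.find(st) + len(st):]
--     if len(ed) == 0 or sub_string.find(ed) < 0:
--         return sub_string.strip()
--     return sub_string[:sub_string.find(ed)]
--
-- def search_last(lines, line_search_num):
--     # One backward pass carrying a 'found_end' flag instead of two sequential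
--     # backward scans; the line that carries the end marker is also tested for
--     # the start marker, matching A's end_line_num-inclusive second loop.
--     seq_id = '-1'
--     end_line_num = -1
--     found_end = False
--     for i in range(line_search_num, 0, -1):
--         line = lines[i]
--         if not found_end:
--             if 'Planning end frame sequence id' in line:
--                 seq_id = get_string_between(line, 'sequence id = [', ']')
--                 end_line_num = i
--                 found_end = True
--                 if 'Planning start frame sequence id = [' + seq_id in line:
--                     return i, end_line_num, seq_id
--         elif 'Planning start frame sequence id = [' + seq_id in line:
--             return i, end_line_num, seq_id
--     if not found_end:
--         return -1, -1, seq_id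
--     return -1, end_line_num, seq_id
-- ===== Notes on version B (the rewrite author's own statement) =====
-- stated objective: simpler
-- what changed: A's two sequential backward scans (find the end-marker line, then rescan from it for the start marker) are merged into one backward pass carrying a found_end flag, testing the end-marker line itself for the start marker to preserve A's inclusive second scan.
import Mathlib
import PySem

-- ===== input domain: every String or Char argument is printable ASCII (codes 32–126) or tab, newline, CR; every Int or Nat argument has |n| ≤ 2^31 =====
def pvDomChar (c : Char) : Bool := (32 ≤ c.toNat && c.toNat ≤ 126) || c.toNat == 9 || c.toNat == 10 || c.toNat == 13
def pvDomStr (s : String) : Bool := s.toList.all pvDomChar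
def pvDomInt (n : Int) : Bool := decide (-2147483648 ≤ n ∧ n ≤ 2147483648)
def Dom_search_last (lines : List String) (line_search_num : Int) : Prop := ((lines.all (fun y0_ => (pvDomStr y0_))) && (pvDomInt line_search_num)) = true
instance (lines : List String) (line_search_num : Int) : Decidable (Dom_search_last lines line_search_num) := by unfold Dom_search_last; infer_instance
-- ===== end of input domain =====

-- B merges A's two sequential backward scans into one backward pass carrying a
-- 'found_end' flag (objective: simpler, one loop instead of two).

-- shared helper (identical in both Pythons): get_string_between
def get_string_between (string st ed : String) : String :=
  if PySem.Str.find string st < 0 then ""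
  else
    let sub_string := PySem.Str.slice string (some (PySem.Str.find string st + PySem.Str.len st)) none
    if PySem.Str.len ed = 0 ∨ PySem.Str.find sub_string ed < 0 then PySem.Str.strip sub_string
    else PySem.Str.slice sub_string none (some (PySem.Str.find sub_string ed))

-- lines[i] for 1 ≤ i ≤ line_search_num; in range under Pre_ (pyGetD's default is never used there)
def pvLine (lines : List String) (i : Nat) : String := PySem.List.pyGetD lines (i : Int) ""

-- ===== PORT A =====
-- first loop: for i in range(line_search_num, 0, -1), find the end-marker line
def pvLoopEnd (lines : List String) : Nat → Int × String
  | 0 => (-1, "-1")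
  | i + 1 =>
    if PySem.Str.isIn "Planning end frame sequence id" (pvLine lines (i + 1)) then
      ((i : Int) + 1, get_string_between (pvLine lines (i + 1)) "sequence id = [" "]")
    else pvLoopEnd lines i

-- second loop: for i in range(end_line_num, 0, -1), find the start-marker line (-1 if none)
def pvLoopStart (lines : List String) (sid : String) : Nat → Int
  | 0 => -1
  | j + 1 =>
    if PySem.Str.isIn ("Planning start frame sequence id = [" ++ sid) (pvLine lines (j + 1)) then (j : Int) + 1
    else pvLoopStart lines sid j

def search_last (lines : List String) (line_search_num : Int) : Int × Int × String :=
  let r := pvLoopEnd lines line_search_num.toNat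
  if r.1 < 0 then (-1, -1, r.2)
  else (pvLoopStart lines r.2 r.1.toNat, r.1, r.2)

-- ===== PORT B =====
-- single backward loop; the Bool is B's found_end flag, Int the end_line_num, String the seq_id
def pvLoopB (lines : List String) : Nat → Bool → Int → String → Int × Int × String
  | 0, found, endn, sid => if found then (-1, endn, sid) else (-1, -1, sid)
  | i + 1, false, endn, sid =>
    if PySem.Str.isIn "Planning end frame sequence id" (pvLine lines (i + 1)) then
      let sid' := get_string_between (pvLine lines (i + 1)) "sequence id = [" "]"
      if PySem.Str.isIn ("Planning start frame sequence id = [" ++ sid') (pvLine lines (i + 1)) then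
        ((i : Int) + 1, (i : Int) + 1, sid')
      else pvLoopB lines i true ((i : Int) + 1) sid'
    else pvLoopB lines i false endn sid
  | i + 1, true, endn, sid =>
    if PySem.Str.isIn ("Planning start frame sequence id = [" ++ sid) (pvLine lines (i + 1)) then
      ((i : Int) + 1, endn, sid)
    else pvLoopB lines i true endn sid

def search_last_alt (lines : List String) (line_search_num : Int) : Int × Int × String :=
  pvLoopB lines line_search_num.toNat false (-1) "-1"

-- ===== PRECONDITION & SPEC =====
-- Pre_ excludes exactly the inputs where A raises IndexError: a positive
-- line_search_num that is not a valid index into lines.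
def Pre_search_last (lines : List String) (line_search_num : Int) : Prop :=
  line_search_num ≤ 0 ∨ line_search_num < (lines.length : Int)
instance (lines : List String) (line_search_num : Int) : Decidable (Pre_search_last lines line_search_num) := by unfold Pre_search_last; infer_instance

def pvWitness_search_last : List String × Int :=
  (["pad", "Planning start frame sequence id = [9]", "Planning end frame sequence id = [9]"], 2)

def Spec_search_last (lines : List String) (line_search_num : Int) (out : Int × Int × String) : Prop := out = search_last_alt lines line_search_num
instance (lines : List String) (line_search_num : Int) (out : Int × Int × String) : Decidable (Spec_search_last lines line_search_num out) := by unfold Spec_search_last; infer_instance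

-- ===== CLAIM (what is proved, stated in full; the proofs are below) =====
def Claim_equal_search_last : Prop := ∀ (lines : List String) (line_search_num : Int), Dom_search_last lines line_search_num → Pre_search_last lines line_search_num → Spec_search_last lines line_search_num (search_last lines line_search_num)

-- ===== LEMMAS AND PROOFS =====

-- once found_end is set, B's loop is A's second loop with endn/sid pinned
theorem pvLoopB_true (lines : List String) (sid : String) (endn : Int) :
    ∀ j : Nat, pvLoopB lines j true endn sid = (pvLoopStart lines sid j, endn, sid) := by
  intro j
  induction j with
  | zero => simp [pvLoopB, pvLoopStart]
  | succ j ih =>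
    simp only [pvLoopB, pvLoopStart]
    split <;> simp [ih]

-- main invariant: A's composed result equals B's loop in the not-yet-found state
theorem pvLoop_main (lines : List String) :
    ∀ i : Nat,
      (let r := pvLoopEnd lines i;
       if r.1 < 0 then ((-1 : Int), (-1 : Int), r.2)
       else (pvLoopStart lines r.2 r.1.toNat, r.1, r.2)) =
      pvLoopB lines i false (-1) "-1" := by
  intro i
  induction i with
  | zero => simp [pvLoopEnd, pvLoopB]
  | succ i ih =>
    simp only [pvLoopEnd, pvLoopB]
    split
    · have h1 : ¬ ((i : Int) + 1 < 0) := by omega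
      have h2 : ((i : Int) + 1).toNat = i + 1 := by omega
      simp only [h1, if_false, h2]
      simp only [pvLoopStart]
      split
      · rfl
      · rw [pvLoopB_true]
    · exact ih

-- ===== VERDICT (by name: the statement is the Claim_ definition above) =====
theorem search_last_spec : Claim_equal_search_last := by
  intro lines n _ _
  unfold Spec_search_last search_last search_last_alt
  exact pvLoop_main lines n.toNat
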